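-- pv_equiv track=rewrite | github.com/Bundi-py/checkio | Elementary/Sort Except Zero.py | except_zero
-- ===== SOURCE A (Python) =====
-- from typing import Iterable
--
-- def except_zero(items: list) -> Iterable:
--     new_list = []
--     for i in items:
--         if i != 0:
--             new_list.append(i)
--             new_list = sorted(new_list)
--
--     for ind, numb in enumerate(items):
--         if numb == 0:
--             new_list.insert(ind, 0)
--     return new_list
-- ===== SOURCE B (Python) =====
-- def except_zero(items: list):
--     it = iter(sorted(x for x in items if x != 0))
--     return [0 if x == 0 else next(it) for x in items]
-- ===== Notes on version B (the rewrite author's own statement) =====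
-- stated objective: faster
-- what changed: A re-sorts the accumulated non-zero list after every append and then inserts zeros one by one; B sorts the non-zeros once and rebuilds the list in a single pass, emitting 0 at original zero positions and the next sorted value elsewhere.
import Mathlib
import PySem

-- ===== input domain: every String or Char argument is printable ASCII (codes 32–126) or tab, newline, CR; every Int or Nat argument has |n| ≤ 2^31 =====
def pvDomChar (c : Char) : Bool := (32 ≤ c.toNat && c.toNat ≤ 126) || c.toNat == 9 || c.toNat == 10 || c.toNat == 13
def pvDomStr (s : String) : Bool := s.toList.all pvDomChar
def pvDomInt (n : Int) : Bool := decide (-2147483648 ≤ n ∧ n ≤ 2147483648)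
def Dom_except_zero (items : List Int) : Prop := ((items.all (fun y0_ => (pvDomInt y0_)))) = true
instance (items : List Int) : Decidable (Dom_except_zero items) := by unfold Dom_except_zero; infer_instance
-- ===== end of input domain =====

-- B sorts the non-zeros once and rebuilds in one pass instead of re-sorting after every append (faster, asymptotic).

-- ===== PORT A =====
def except_zero (items : List Int) : List Int :=
  let nl := items.foldl
    (fun l i => if i ≠ 0 then PySem.List.sorted (l ++ [i]) (fun x => x) false else l) []
  (PySem.List.enumerate items 0).foldl
    (fun l p => if p.2 = 0 then PySem.List.insert l p.1 0 else l) nl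

-- ===== PORT B =====
-- the single rebuilding pass: 0 stays, a non-zero takes the next sorted value
def pvConsume : List Int → List Int → List Int
  | [], _ => []
  | x :: xs, s =>
    if x = 0 then 0 :: pvConsume xs s
    else match s with
      | [] => []          -- unreachable: s holds exactly the non-zeros
      | y :: t => y :: pvConsume xs t

def except_zero_alt (items : List Int) : List Int :=
  pvConsume items (PySem.List.sorted (items.filter (fun x => x ≠ 0)) (fun x => x) false)

-- ===== PRECONDITION & SPEC =====
def Spec_except_zero (items : List Int) (out : List Int) : Prop := out = except_zero_alt items
instance (items : List Int) (out : List Int) : Decidable (Spec_except_zero items out) := by unfold Spec_except_zero; infer_instance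

-- ===== CLAIM (what is proved, stated in full; the proofs are below) =====
def Claim_equal_except_zero : Prop := ∀ (items : List Int), Dom_except_zero items → Spec_except_zero items (except_zero items)

-- ===== LEMMAS AND PROOFS =====

-- A's first loop keeps its accumulator sorted; overall it computes sorted(non-zeros).
lemma loop1 (items : List Int) : ∀ (acc : List Int),
    items.foldl (fun l i => if i ≠ 0 then PySem.List.sorted (l ++ [i]) (fun x => x) false else l)
      (PySem.List.sorted acc (fun x => x) false)
    = PySem.List.sorted (acc ++ items.filter (fun x => x ≠ 0)) (fun x => x) false := by
  induction items with
  | nil => intro acc; simp [List.foldl]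
  | cons i xs ih =>
    intro acc
    by_cases hi : i = 0
    · subst hi
      simpa using ih acc
    · have hperm : (PySem.List.sorted acc (fun x => x) false ++ [i]).Perm (acc ++ [i]) :=
        (PySem.List.sorted_perm acc (fun x => x) false).append_right [i]
      have hs : PySem.List.sorted (PySem.List.sorted acc (fun x => x) false ++ [i]) (fun x => x) false
          = PySem.List.sorted (acc ++ [i]) (fun x => x) false :=
        PySem.List.sorted_eq_sorted_of_perm _ _ _ (fun a b h => h) hperm
      have := ih (acc ++ [i])
      simp [List.foldl, hi, hs] at this ⊢
      simpa using this

-- inserting at the boundary between the rebuilt prefix and the remaining sorted values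
lemma insert_mid (acc S : List Int) :
    PySem.List.insert (acc ++ S) ((acc.length : Int)) 0 = acc ++ 0 :: S := by
  rw [PySem.List.insert_natCast _ _ _ (by simp)]
  simp

-- A's second loop, with the already-rebuilt prefix acc, equals pvConsume.
lemma loop2 (p : List Int) : ∀ (S acc : List Int),
    S.length = (p.filter (fun x => x ≠ 0)).length →
    (PySem.List.enumerate p ((acc.length : Int))).foldl
      (fun l q => if q.2 = 0 then PySem.List.insert l q.1 0 else l) (acc ++ S)
    = acc ++ pvConsume p S := by
  induction p with
  | nil =>
    intro S acc h
    simp at h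
    simp [h, pvConsume, PySem.List.enumerate]
  | cons x xs ih =>
    intro S acc h
    rw [PySem.List.enumerate_cons]
    by_cases hx : x = 0
    · subst hx
      simp only [List.foldl, ite_true, insert_mid]
      have h' : S.length = (xs.filter (fun x => x ≠ 0)).length := by
        simpa using h
      have := ih S (acc ++ [0]) (by simpa using h')
      simp only [List.length_append, List.length_cons, List.length_nil] at this
      push_cast at this
      simp only [List.append_assoc, List.cons_append, List.nil_append] at this
      rw [this]
      simp [pvConsume]
    · have h' : S.length = (xs.filter (fun x => x ≠ 0)).length + 1 := by
        simp [List.filter, hx] at h; simpa using h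
      obtain ⟨y, t, rfl⟩ : ∃ y t, S = y :: t := by
        cases S with
        | nil => simp at h'
        | cons y t => exact ⟨y, t, rfl⟩
      simp only [List.foldl, if_neg hx]
      have ht : t.length = (xs.filter (fun x => x ≠ 0)).length := by
        simpa using h'
      have := ih t (acc ++ [y]) ht
      simp only [List.length_append, List.length_cons, List.length_nil] at this
      push_cast at this
      simp only [List.append_assoc, List.cons_append, List.nil_append] at this
      rw [this]
      simp [pvConsume, hx]

-- ===== VERDICT (by name: the statement is the Claim_ definition above) =====
theorem except_zero_spec : Claim_equal_except_zero := by
  intro items _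
  show except_zero items = except_zero_alt items
  unfold except_zero except_zero_alt
  have h1 := loop1 items []
  simp only [List.nil_append] at h1
  have hnil : PySem.List.sorted ([] : List Int) (fun x => x) false = [] := rfl
  rw [hnil] at h1
  simp only [h1]
  have h2 := loop2 items (PySem.List.sorted (items.filter (fun x => x ≠ 0)) (fun x => x) false) []
    (by rw [PySem.List.length_sorted])
  simpa using h2
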